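-- pv_equiv track=rewrite | github.com/histuckyi/algorithm | programmers/autocomplete.py | solution
-- ===== SOURCE A (Python) =====
-- def solution(words):
--     word_cnt = 0 # total word count
--     words.sort() # sorting
--
--     for word_idx in range(len(words)):
--         current_word = words[word_idx] #  word to look for
--         current_word_length = len(current_word)
--         current_word_last_index = current_word_length -1  # length -> last index
--         front_idx = -1 # Index matching with previous word
--         back_idx = -1 # Index matching with back word
--
--         # idx == 0 -> pass
--         if word_idx > 0:
--             front_word = words[word_idx -1]
--             for i in range(current_word_length):
--                 if i == len(front_word):
--                     break
--                 if front_word[i] == current_word[i]: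
--                     front_idx += 1
--                 else:
--                     break
--
--         # idx == last index -> pass
--         if word_idx < len(words) - 1:
--             back_word = words[word_idx +1]
--             for j in range(current_word_length):
--                 if j == len(back_word):
--                     break
--                 if back_word[j] == current_word[j]:
--                     back_idx += 1
--                 else:
--                     break
--
--         # both front,back word do not match the current word -> 1 character
--         if front_idx == -1 and back_idx == -1:
--             word_cnt += 1
--         else:
--             max_idx = max(front_idx, back_idx)
--             max_cnt = max_idx + 1 # idex -> length
--             # @warning, if more than word length, one more character. (index + 1) + 1
--             if max_idx < current_word_last_index:
--                 max_cnt += 1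
--             word_cnt += max_cnt
--     return word_cnt
-- ===== SOURCE B (Python) =====
-- def solution(words):
--     # Trie-via-prefix-counter: count every nonempty prefix once, then each word
--     # costs the length of its shortest globally-unique prefix (capped at its length).
--     cnt = {}
--     for w in words:
--         for k in range(1, len(w) + 1):
--             p = w[:k]
--             cnt[p] = cnt.get(p, 0) + 1
--     total = 0
--     for w in words:
--         c = len(w)  # no unique prefix: the whole word must be typed
--         for k in range(1, len(w) + 1):
--             if cnt[w[:k]] == 1:
--                 c = k
--                 break
--         total += max(c, 1)  # selecting any word takes at least one keystroke
--     return total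
-- ===== Notes on version B (the rewrite author's own statement) =====
-- stated objective: alternative
-- what changed: A sorts the list and, per word, re-scans both sorted neighbours character by character with -1-based index bookkeeping; B never sorts: it builds one dictionary counting every nonempty prefix of every word (a trie via a counter) and each word's cost is the length of its shortest prefix with count 1, capped at its length and at least 1.
import Mathlib
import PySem

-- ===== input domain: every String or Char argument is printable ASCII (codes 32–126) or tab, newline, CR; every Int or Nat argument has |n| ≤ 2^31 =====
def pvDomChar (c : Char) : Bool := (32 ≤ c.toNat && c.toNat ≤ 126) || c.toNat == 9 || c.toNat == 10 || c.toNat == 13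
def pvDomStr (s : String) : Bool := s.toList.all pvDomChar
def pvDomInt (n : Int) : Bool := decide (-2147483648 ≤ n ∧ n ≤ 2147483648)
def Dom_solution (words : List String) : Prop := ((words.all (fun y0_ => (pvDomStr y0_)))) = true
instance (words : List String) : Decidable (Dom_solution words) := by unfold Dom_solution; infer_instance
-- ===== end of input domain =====

-- B replaces A's sort-and-compare-neighbours scan by a prefix-counter (trie-style) dictionary; equivalence
-- is about the RETURN value only (Python A sorts its argument in place, B does not mutate it).

-- ===== PORT A =====
-- the front/back inner loops of A: for i in range(len(current_word)): if i == len(front_word): break;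
-- if front_word[i] == current_word[i]: idx += 1 else: break   (fuel = remaining iterations of the range)
def lcpScan (f cs : List Char) : Nat → Nat → Int → Int
  | 0, _, idx => idx
  | fuel+1, i, idx =>
    if i = f.length then idx
    else if f.getD i ' ' = cs.getD i ' ' then lcpScan f cs fuel (i+1) (idx+1)
    else idx

-- the body of A's main loop: the amount added to word_cnt for index wi (indices provably in range,
-- so words[...] is ported with getD; range(len(words)) is ported as List.range)
def costA (ws : List String) (wi : Nat) : Int :=
  let cw := (ws.getD wi "").toList
  let fidx : Int := if 0 < wi then lcpScan (ws.getD (wi-1) "").toList cw cw.length 0 (-1) else -1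
  let bidx : Int := if wi < ws.length - 1 then lcpScan (ws.getD (wi+1) "").toList cw cw.length 0 (-1) else -1
  if fidx = -1 ∧ bidx = -1 then 1
  else
    let maxIdx := max fidx bidx
    let maxCnt := maxIdx + 1
    if maxIdx < (cw.length : Int) - 1 then maxCnt + 1 else maxCnt

def solution (words : List String) : Int :=
  let ws := PySem.List.sorted words (fun w => w) false
  (List.range ws.length).foldl (fun cnt wi => cnt + costA ws wi) 0

-- ===== PORT B =====
-- cnt[p] = cnt.get(p, 0) + 1 over p = w[:k], k in range(1, len(w)+1)  (strings ported via toList;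
-- w[:k] for k = j+1, j in range(len(w)) is take (j+1))
def prefixCounts (words : List String) : PySem.Dict (List Char) Int :=
  words.foldl (fun d w =>
    (List.range w.toList.length).foldl (fun d j =>
      let p := w.toList.take (j+1)
      d.insert p (d.getD p 0 + 1)) d) PySem.Dict.empty

-- c = len(w); for k in range(1, len(w)+1): if cnt[w[:k]] == 1: c = k; break; total += max(c, 1)
-- (cnt[p] raises KeyError only on a missing key; every looked-up p is a nonempty prefix of w, hence
-- present in cnt, so getD 0 is exact here)
def firstUniq (d : PySem.Dict (List Char) Int) (w : List Char) : Nat → Nat → Int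
  | 0, _ => (w.length : Int)
  | fuel+1, k => if d.getD (w.take k) 0 = 1 then (k : Int) else firstUniq d w fuel (k+1)

def solution_alt (words : List String) : Int :=
  let cnt := prefixCounts words
  words.foldl (fun total w => total + max (firstUniq cnt w.toList w.toList.length 1) 1) 0

-- ===== PRECONDITION & SPEC =====
def Spec_solution (words : List String) (out : Int) : Prop := out = solution_alt words
instance (words : List String) (out : Int) : Decidable (Spec_solution words out) := by unfold Spec_solution; infer_instance

-- ===== CLAIM (what is proved, stated in full; the proofs are below) =====
def Claim_equal_solution : Prop := ∀ (words : List String), Dom_solution words → Spec_solution words (solution words)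

-- ===== LEMMAS AND PROOFS =====

-- longest common prefix of two character lists
def lcp : List Char → List Char → Nat
  | a::as, b::bs => if a = b then lcp as bs + 1 else 0
  | _, _ => 0

@[simp] lemma lcp_nil_left (b : List Char) : lcp [] b = 0 := by cases b <;> rfl
@[simp] lemma lcp_nil_right (a : List Char) : lcp a [] = 0 := by cases a <;> rfl

lemma lcp_comm (a : List Char) : ∀ b, lcp a b = lcp b a := by
  induction a with
  | nil => intro b; simp
  | cons x as ih =>
    intro b
    cases b with
    | nil => simp
    | cons y bs =>
      simp only [lcp]
      by_cases h : x = y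
      · subst h; simp [ih]
      · simp [h, Ne.symm h]

lemma lcp_le_right (a : List Char) : ∀ b, lcp a b ≤ b.length := by
  induction a with
  | nil => intro b; simp
  | cons x as ih =>
    intro b
    cases b with
    | nil => simp
    | cons y bs =>
      simp only [lcp]
      by_cases h : x = y <;> simp [h]
      exact ih bs

lemma le_lcp_iff (a : List Char) : ∀ (b : List Char) (k : Nat),
    k ≤ lcp a b ↔ k ≤ a.length ∧ a.take k <+: b := by
  induction a with
  | nil =>
    intro b k
    simp only [lcp_nil_left, List.length_nil, Nat.le_zero, List.take_nil]
    constructor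
    · rintro rfl; exact ⟨rfl, List.nil_prefix⟩
    · rintro ⟨rfl, -⟩; rfl
  | cons x as ih =>
    intro b k
    cases b with
    | nil =>
      simp only [lcp_nil_right, Nat.le_zero, List.prefix_nil]
      constructor
      · rintro rfl; simp
      · rintro ⟨-, h⟩
        cases k with
        | zero => rfl
        | succ k => simp [List.take_succ_cons] at h
    | cons y bs =>
      cases k with
      | zero => simp [List.nil_prefix]
      | succ k =>
        simp only [lcp]
        by_cases h : x = y
        · subst h
          simp only [if_true, List.take_succ_cons, List.length_cons,
            Nat.add_le_add_iff_right, List.cons_prefix_cons, true_and]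
          exact ih bs k
        · simp [h, List.take_succ_cons, List.cons_prefix_cons]

-- the lcp seen by A from the previous / next sorted word at index i (0 when there is no such word)
def nbrF (ws : List String) (i : Nat) : Nat :=
  if 0 < i then lcp (ws.getD (i-1) "").toList (ws.getD i "").toList else 0
def nbrB (ws : List String) (i : Nat) : Nat :=
  if i < ws.length - 1 then lcp (ws.getD (i+1) "").toList (ws.getD i "").toList else 0
def nbr (ws : List String) (i : Nat) : Nat := max (nbrF ws i) (nbrB ws i)

lemma lcpScan_eq (f cs : List Char) :
    ∀ (fuel i : Nat) (idx : Int), fuel + i = cs.length → i ≤ f.length →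
      lcpScan f cs fuel i idx = idx + (lcp (f.drop i) (cs.drop i) : Int) := by
  intro fuel
  induction fuel with
  | zero =>
    intro i idx hic _
    have : cs.drop i = [] := List.drop_eq_nil_of_le (by omega)
    simp [lcpScan, this]
  | succ fuel ih =>
    intro i idx hic hif
    have hic2 : i < cs.length := by omega
    simp only [lcpScan]
    by_cases hf : i = f.length
    · have : f.drop i = [] := List.drop_eq_nil_of_le (by omega)
      simp [hf]
    · have hif2 : i < f.length := by omega
      rw [if_neg hf, List.getD_eq_getElem f ' ' hif2, List.getD_eq_getElem cs ' ' hic2]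
      by_cases heq : f[i] = cs[i]
      · rw [if_pos heq, ih (i+1) (idx+1) (by omega) (by omega),
          List.drop_eq_getElem_cons hif2, List.drop_eq_getElem_cons hic2]
        simp only [lcp, if_pos heq]
        push_cast
        ring
      · rw [if_neg heq, List.drop_eq_getElem_cons hif2, List.drop_eq_getElem_cons hic2]
        simp only [lcp, if_neg heq]
        simp


lemma costA_eq (ws : List String) (i : Nat) :
    costA ws i =
      if (ws.getD i "").toList.length = 0 then 1
      else min ((nbr ws i : Int) + 1) ((ws.getD i "").toList.length : Int) := by
  have hscan : ∀ g : List Char, lcpScan g (ws.getD i "").toList (ws.getD i "").toList.length 0 (-1)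
      = (lcp g (ws.getD i "").toList : Int) - 1 := by
    intro g
    rw [lcpScan_eq g (ws.getD i "").toList (ws.getD i "").toList.length 0 (-1) (by omega) (Nat.zero_le _)]
    simp [List.drop_zero]
    ring
  have hFle : nbrF ws i ≤ (ws.getD i "").toList.length := by
    unfold nbrF; split_ifs
    · exact lcp_le_right _ _
    · omega
  have hBle : nbrB ws i ≤ (ws.getD i "").toList.length := by
    unfold nbrB; split_ifs
    · exact lcp_le_right _ _
    · omega
  have hf : (if 0 < i then lcpScan (ws.getD (i-1) "").toList (ws.getD i "").toList (ws.getD i "").toList.length 0 (-1) else (-1 : Int))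
      = (nbrF ws i : Int) - 1 := by
    unfold nbrF; split_ifs
    · rw [hscan]
    · simp
  have hb : (if i < ws.length - 1 then lcpScan (ws.getD (i+1) "").toList (ws.getD i "").toList (ws.getD i "").toList.length 0 (-1) else (-1 : Int))
      = (nbrB ws i : Int) - 1 := by
    unfold nbrB; split_ifs
    · rw [hscan]
    · simp
  unfold costA
  simp only [hf, hb]
  unfold nbr
  split_ifs <;> push_cast [Nat.cast_max] <;> omega

-- counter characterization: the dictionary counts, for every nonempty p, the words having p as a prefix
lemma innerFold (l : List Char) :
    ∀ (m : Nat), m ≤ l.length → ∀ (d : PySem.Dict (List Char) Int) (p : List Char),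
      ((List.range m).foldl (fun d j =>
          let q := l.take (j+1)
          d.insert q (d.getD q 0 + 1)) d).getD p 0
        = d.getD p 0 + (if 1 ≤ p.length ∧ p.length ≤ m ∧ p <+: l then 1 else 0) := by
  intro m
  induction m with
  | zero =>
    intro _ d p
    simp only [List.range_zero, List.foldl_nil]
    rw [if_neg (by rintro ⟨h1, h2, h3⟩; omega)]
    omega
  | succ m ih =>
    intro hm d p
    rw [List.range_succ, List.foldl_append]
    simp only [List.foldl_cons, List.foldl_nil]
    have hlen : (l.take (m+1)).length = m + 1 := by
      rw [List.length_take]; omega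
    rw [PySem.Dict.getD_insert]
    by_cases hpq : p = l.take (m+1)
    · subst hpq
      rw [if_pos rfl, ih (by omega) d]
      have hpre : l.take (m+1) <+: l := List.take_prefix _ _
      rw [if_neg (by rintro ⟨h1, h2, h3⟩; omega), if_pos ⟨by omega, by omega, hpre⟩]
      omega
    · rw [if_neg hpq, ih (by omega) d]
      congr 1
      by_cases hc : 1 ≤ p.length ∧ p.length ≤ m ∧ p <+: l
      · rw [if_pos hc, if_pos ⟨hc.1, by omega, hc.2.2⟩]
      · rw [if_neg hc]
        by_cases hc2 : 1 ≤ p.length ∧ p.length ≤ m + 1 ∧ p <+: l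
        · exfalso
          have hlp : p.length = m + 1 := by
            rcases hc2 with ⟨h1, h2, h3⟩
            by_cases h : p.length ≤ m
            · exact absurd ⟨h1, h, h3⟩ hc
            · omega
          apply hpq
          rw [List.prefix_iff_eq_take.mp hc2.2.2, hlp]
        · rw [if_neg hc2]

lemma outerFold (p : List Char) : ∀ (ls : List String) (d : PySem.Dict (List Char) Int),
    (ls.foldl (fun d w =>
        (List.range w.toList.length).foldl (fun d j =>
          let q := w.toList.take (j+1)
          d.insert q (d.getD q 0 + 1)) d) d).getD p 0
      = d.getD p 0 + (ls.countP (fun w => decide (p ≠ [] ∧ p <+: w.toList)) : Int) := by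
  intro ls
  induction ls with
  | nil => intro d; simp
  | cons w t ih =>
    intro d
    rw [List.foldl_cons, ih, innerFold w.toList w.toList.length (le_refl _) d p,
      List.countP_cons]
    have : (1 ≤ p.length ∧ p.length ≤ w.toList.length ∧ p <+: w.toList)
        ↔ (p ≠ [] ∧ p <+: w.toList) := by
      constructor
      · rintro ⟨h1, h2, h3⟩
        exact ⟨by intro h; subst h; simp at h1, h3⟩
      · rintro ⟨h1, h2⟩
        exact ⟨by cases p with | nil => simp at h1 | cons _ _ => simp, h2.length_le, h2⟩
    by_cases hc : p ≠ [] ∧ p <+: w.toList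
    · rw [if_pos (this.mpr hc), if_pos (by simpa using hc)]
      push_cast; omega
    · rw [if_neg (fun h => hc (this.mp h)), if_neg (by simpa using hc)]
      push_cast; omega

lemma prefixCounts_getD (words : List String) (p : List Char) :
    (prefixCounts words).getD p 0 =
      (words.countP (fun w => decide (p ≠ [] ∧ p <+: w.toList)) : Int) := by
  unfold prefixCounts
  rw [outerFold p words PySem.Dict.empty, PySem.Dict.getD_empty]
  omega

-- two distinct positions satisfying a predicate give countP ≥ 2, and conversely
lemma countP_two_of_indices {α : Type} (q : α → Bool) :
    ∀ (l : List α) (i j : Nat), i < j → (hj : j < l.length) → (hi : i < l.length) →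
      q (l[i]'hi) → q (l[j]'hj) → 2 ≤ l.countP q := by
  intro l
  induction l with
  | nil => intro i j _ hj; simp at hj
  | cons x t ih =>
    intro i j hij hj hi hqi hqj
    cases i with
    | zero =>
      simp only [List.getElem_cons_zero] at hqi
      cases j with
      | zero => omega
      | succ j =>
        simp only [List.getElem_cons_succ] at hqj
        have h1 : 1 ≤ t.countP q := by
          rw [List.one_le_countP_iff]
          exact ⟨t[j]'(by simpa using hj), List.getElem_mem _, hqj⟩
        rw [List.countP_cons, if_pos hqi]
        omega
    | succ i =>
      cases j with
      | zero => omega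
      | succ j =>
        simp only [List.getElem_cons_succ] at hqi hqj
        have := ih i j (by omega) (by simpa using hj) (by simpa using hi) hqi hqj
        rw [List.countP_cons]
        omega

lemma indices_of_countP_two {α : Type} (q : α → Bool) :
    ∀ (l : List α), 2 ≤ l.countP q →
      ∃ (i j : Nat) (hj : j < l.length) (hi : i < l.length), i < j ∧ q (l[i]'hi) ∧ q (l[j]'hj) := by
  intro l
  induction l with
  | nil => intro h; simp at h
  | cons x t ih =>
    intro h
    rw [List.countP_cons] at h
    by_cases hx : q x
    · rw [if_pos hx] at h
      have h1 : 1 ≤ t.countP q := by omega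
      rw [List.one_le_countP_iff] at h1
      obtain ⟨a, ha, hqa⟩ := h1
      obtain ⟨j, hjlt, rfl⟩ := List.mem_iff_getElem.mp ha
      exact ⟨0, j+1, by simpa using hjlt, by simp, by omega, by simpa using hx, by simpa using hqa⟩
    · rw [if_neg hx] at h
      obtain ⟨i, j, hj, hi, hij, hqi, hqj⟩ := ih (by omega)
      exact ⟨i+1, j+1, by simpa using hj, by simpa using hi, by omega, by simpa using hqi, by simpa using hqj⟩

-- lexicographic betweenness: a string between two strings sharing a prefix shares it too
lemma cons_le_nil_false (x : Char) (a : List Char) (h : (x::a : List Char) ≤ []) : False := by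
  rcases le_iff_lt_or_eq.mp h with h1 | h1
  · exact List.not_lt_nil _ h1
  · simp at h1

lemma le_cons_iff_char (x y : Char) (a b : List Char) :
    (x::a : List Char) ≤ y::b ↔ x < y ∨ (x = y ∧ a ≤ b) := by
  constructor
  · intro h
    rcases lt_trichotomy x y with hxy | hxy | hxy
    · exact Or.inl hxy
    · subst hxy
      refine Or.inr ⟨rfl, ?_⟩
      by_contra hab
      rw [not_le] at hab
      exact absurd (List.cons_lt_cons_self.mpr hab) (not_lt_of_ge h)
    · exfalso
      have : (y::b : List Char) < x::a := List.cons_lt_cons_iff.mpr (Or.inl hxy)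
      exact absurd this (not_lt_of_ge h)
  · rintro (hxy | ⟨rfl, hab⟩)
    · exact le_of_lt (List.cons_lt_cons_iff.mpr (Or.inl hxy))
    · rcases le_iff_lt_or_eq.mp hab with h1 | h1
      · exact le_of_lt (List.cons_lt_cons_self.mpr h1)
      · subst h1; rfl

lemma prefix_of_between (p : List Char) :
    ∀ (a b c : List Char), p <+: a → p <+: c → a ≤ b → b ≤ c → p <+: b := by
  induction p with
  | nil => intro a b c _ _ _ _; exact List.nil_prefix
  | cons x p ih =>
    intro a b c hpa hpc hab hbc
    obtain ⟨ta, rfl⟩ := hpa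
    obtain ⟨tc, rfl⟩ := hpc
    cases b with
    | nil => exact absurd hab (by intro h; exact cons_le_nil_false _ _ (by simpa using h))
    | cons y bs =>
      rw [List.cons_append] at hab hbc
      rcases (le_cons_iff_char _ _ _ _).mp hab with h1 | ⟨he1, hab'⟩
      · rcases (le_cons_iff_char _ _ _ _).mp hbc with h2 | ⟨he2, _⟩
        · exact absurd (lt_trans h1 h2) (lt_irrefl _)
        · subst he2; exact absurd h1 (lt_irrefl _)
      · subst he1
        rcases (le_cons_iff_char _ _ _ _).mp hbc with h2 | ⟨_, hbc'⟩
        · exact absurd h2 (lt_irrefl _)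
        · rw [List.cons_prefix_cons]
          exact ⟨rfl, ih (p ++ ta) bs (p ++ tc) (List.prefix_append _ _) (List.prefix_append _ _) hab' hbc'⟩


-- MAIN: in the sorted list, some OTHER occurrence shares the first k characters of word i
-- iff one of the two neighbours does
lemma shared_iff (words : List String) (i k : Nat)
    (hi : i < (PySem.List.sorted words (fun w => w) false).length) (hk1 : 1 ≤ k)
    (hkL : k ≤ ((PySem.List.sorted words (fun w => w) false).getD i "").toList.length) :
    (2 ≤ words.countP (fun v => decide ((((PySem.List.sorted words (fun w => w) false).getD i "").toList.take k) ≠ [] ∧ (((PySem.List.sorted words (fun w => w) false).getD i "").toList.take k) <+: v.toList)))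
      ↔ k ≤ nbr (PySem.List.sorted words (fun w => w) false) i := by
  set ws := PySem.List.sorted words (fun w => w) false with hws
  set p := (ws.getD i "").toList.take k with hp
  set q : String → Bool := fun v => decide (p ≠ [] ∧ p <+: v.toList) with hq
  have hperm : ws.Perm words := PySem.List.sorted_perm words (fun w => w) false
  rw [← hperm.countP_eq]
  have hplen : p.length = k := by
    rw [hp, List.length_take]; omega
  have hpne : p ≠ [] := by
    intro h; rw [h] at hplen; simp at hplen; omega
  have hcur : p <+: (ws.getD i "").toList := List.take_prefix _ _
  have hgetD : ∀ (j : Nat) (hj : j < ws.length), ws.getD j "" = ws[j]'hj := by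
    intro j hj; exact List.getD_eq_getElem ws "" hj
  have hqi : q (ws[i]'hi) = true := by
    rw [hq]; simp only [decide_eq_true_eq]
    exact ⟨hpne, by rw [← hgetD i hi]; exact hcur⟩
  -- from a shared prefix to an lcp bound with a given other string
  have hshare_lcp : ∀ (v : String), p <+: v.toList →
      k ≤ lcp v.toList (ws.getD i "").toList := by
    intro v hv
    rw [le_lcp_iff]
    have hlen : k ≤ v.toList.length := by
      have := hv.length_le; omega
    have : v.toList.take k = p := by
      have h1 : p = v.toList.take p.length := List.prefix_iff_eq_take.mp hv
      rw [hplen] at h1; exact h1.symm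
    exact ⟨hlen, by rw [this]; exact hcur⟩
  -- a sorted-order chain gives prefixes of everything between
  have hmono : ∀ (j1 j2 : Nat) (hj1 : j1 < ws.length) (hj2 : j2 < ws.length), j1 ≤ j2 →
      (ws[j1]'hj1).toList ≤ (ws[j2]'hj2).toList := by
    intro j1 j2 hj1 hj2 hle
    rw [← String.le_iff_toList_le]
    exact PySem.List.key_sorted_getElem_mono words (fun w => w) hle hj2
  constructor
  · -- some other occurrence shares p ⇒ a neighbour does
    intro h2
    obtain ⟨i1, i2, hi2, hi1, h12, hq1, hq2⟩ := indices_of_countP_two q ws h2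
    have hqj : ∃ (j : Nat) (hj : j < ws.length), j ≠ i ∧ q (ws[j]'hj) = true := by
      by_cases h : i1 = i
      · exact ⟨i2, hi2, by omega, hq2⟩
      · exact ⟨i1, hi1, h, hq1⟩
    obtain ⟨j, hj, hjne, hqj⟩ := hqj
    rw [hq] at hqj; simp only [decide_eq_true_eq] at hqj
    rcases Nat.lt_or_ge j i with hji | hji
    · -- j < i: the previous word shares p
      have h0i : 0 < i := by omega
      have hi1' : i - 1 < ws.length := by omega
      have hbet : p <+: (ws[i-1]'hi1').toList := by
        refine prefix_of_between p (ws[j]'hj).toList (ws[i-1]'hi1').toList (ws[i]'hi).toList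
          hqj.2 (by rw [← hgetD i hi]; exact hcur) ?_ ?_
        · exact hmono j (i-1) hj hi1' (by omega)
        · exact hmono (i-1) i hi1' hi (by omega)
      have : k ≤ nbrF ws i := by
        unfold nbrF
        rw [if_pos h0i]
        exact hshare_lcp _ (by rw [hgetD (i-1) hi1']; exact hbet)
      unfold nbr; omega
    · -- i < j: the next word shares p
      have hij : i < j := by omega
      have hi1' : i + 1 < ws.length := by omega
      have hbet : p <+: (ws[i+1]'hi1').toList := by
        refine prefix_of_between p (ws[i]'hi).toList (ws[i+1]'hi1').toList (ws[j]'hj).toList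
          (by rw [← hgetD i hi]; exact hcur) hqj.2 ?_ ?_
        · exact hmono i (i+1) hi hi1' (by omega)
        · exact hmono (i+1) j hi1' hj (by omega)
      have : k ≤ nbrB ws i := by
        unfold nbrB
        rw [if_pos (by omega)]
        exact hshare_lcp _ (by rw [hgetD (i+1) hi1']; exact hbet)
      unfold nbr; omega
  · -- a neighbour shares p ⇒ two occurrences share p
    intro hnbr
    unfold nbr at hnbr
    by_cases hcase : k ≤ nbrF ws i
    · have h0i : 0 < i := by
        unfold nbrF at hcase
        by_contra h
        rw [if_neg h] at hcase; omega
      have hi1' : i - 1 < ws.length := by omega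
      have hlcp : k ≤ lcp (ws.getD (i-1) "").toList (ws.getD i "").toList := by
        unfold nbrF at hcase; rw [if_pos h0i] at hcase; exact hcase
      have hqprev : q (ws[i-1]'hi1') = true := by
        rw [hq]; simp only [decide_eq_true_eq]
        refine ⟨hpne, ?_⟩
        rw [le_lcp_iff] at hlcp
        have : (ws.getD (i-1) "").toList.take k = p := by
          have h1 := hlcp.2
          have h2 : p = (ws.getD (i-1) "").toList.take p.length :=
            List.prefix_iff_eq_take.mp (by
              rw [← le_lcp_iff] at hlcp
              rw [lcp_comm] at hlcp
              rw [le_lcp_iff] at hlcp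
              exact hlcp.2)
          rw [hplen] at h2; exact h2.symm
        rw [← hgetD (i-1) hi1', ← this]
        exact List.take_prefix _ _
      exact countP_two_of_indices q ws (i-1) i (by omega) hi hi1' hqprev hqi
    · have hcase' : k ≤ nbrB ws i := by omega
      have hlt : i < ws.length - 1 := by
        unfold nbrB at hcase'
        by_contra h
        rw [if_neg h] at hcase'; omega
      have hi1' : i + 1 < ws.length := by omega
      have hlcp : k ≤ lcp (ws.getD (i+1) "").toList (ws.getD i "").toList := by
        unfold nbrB at hcase'; rw [if_pos hlt] at hcase'; exact hcase'
      have hqnext : q (ws[i+1]'hi1') = true := by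
        rw [hq]; simp only [decide_eq_true_eq]
        refine ⟨hpne, ?_⟩
        rw [lcp_comm] at hlcp
        rw [le_lcp_iff] at hlcp
        have h2 : p = (ws.getD (i+1) "").toList.take p.length :=
          List.prefix_iff_eq_take.mp hlcp.2
        rw [← hgetD (i+1) hi1', List.prefix_iff_eq_take, hplen]
        rw [hplen] at h2
        exact h2
      exact countP_two_of_indices q ws i (i+1) (by omega) hi1' hi hqi hqnext

lemma nbr_le_len (ws : List String) (i : Nat) : nbr ws i ≤ (ws.getD i "").toList.length := by
  unfold nbr nbrF nbrB
  have h1 := lcp_le_right (ws.getD (i-1) "").toList (ws.getD i "").toList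
  have h2 := lcp_le_right (ws.getD (i+1) "").toList (ws.getD i "").toList
  split_ifs <;> omega

lemma firstUniq_eq (d : PySem.Dict (List Char) Int) (w : List Char) (N : Nat)
    (hNL : N ≤ w.length)
    (hiff : ∀ j, 1 ≤ j → j ≤ w.length → (d.getD (w.take j) 0 = 1 ↔ N < j)) :
    ∀ (fuel k : Nat), fuel + k = w.length + 1 → 1 ≤ k → k ≤ N + 1 →
      firstUniq d w fuel k = min ((N : Int) + 1) (w.length : Int) := by
  intro fuel
  induction fuel with
  | zero =>
    intro k hk h1k hkN
    have hNL' : N = w.length := by omega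
    subst hNL'
    simp only [firstUniq]
    omega
  | succ fuel ih =>
    intro k hk h1k hkN
    have hkL : k ≤ w.length := by omega
    have hd := hiff k h1k hkL
    simp only [firstUniq]
    by_cases hN : N < k
    · rw [if_pos (hd.mpr hN)]
      omega
    · rw [if_neg (fun h => hN (hd.mp h))]
      rw [ih (k+1) (by omega) (by omega) (by omega)]

-- per-word value of B, at sorted position i
lemma cB_eq (words : List String) (i : Nat)
    (hi : i < (PySem.List.sorted words (fun w => w) false).length) :
    firstUniq (prefixCounts words) ((PySem.List.sorted words (fun w => w) false).getD i "").toList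
        ((PySem.List.sorted words (fun w => w) false).getD i "").toList.length 1
      = min ((nbr (PySem.List.sorted words (fun w => w) false) i : Int) + 1)
            (((PySem.List.sorted words (fun w => w) false).getD i "").toList.length : Int) := by
  set ws := PySem.List.sorted words (fun w => w) false with hws
  have hperm : ws.Perm words := PySem.List.sorted_perm words (fun w => w) false
  apply firstUniq_eq (prefixCounts words) (ws.getD i "").toList (nbr ws i) (nbr_le_len ws i)
  · intro j h1j hjL
    rw [prefixCounts_getD]
    have hmem : ws.getD i "" ∈ words := by
      apply hperm.mem_iff.mp
      rw [List.getD_eq_getElem ws "" hi]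
      exact List.getElem_mem _
    have hone : 1 ≤ words.countP (fun v =>
        decide ((ws.getD i "").toList.take j ≠ [] ∧ (ws.getD i "").toList.take j <+: v.toList)) := by
      rw [List.one_le_countP_iff]
      refine ⟨ws.getD i "", hmem, ?_⟩
      simp only [decide_eq_true_eq]
      constructor
      · intro h
        have := congrArg List.length h
        rw [List.length_take] at this
        simp only [List.length_nil] at this
        omega
      · exact List.take_prefix _ _
    have hs := shared_iff words i j hi h1j hjL
    rw [← hws] at hs
    constructor
    · intro h
      have hC : words.countP (fun v =>
          decide ((ws.getD i "").toList.take j ≠ [] ∧ (ws.getD i "").toList.take j <+: v.toList)) = 1 := by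
        exact_mod_cast h
      by_contra hnj
      have h2 := hs.mpr (by omega)
      omega
    · intro h
      have hn2 : ¬ 2 ≤ words.countP (fun v =>
          decide ((ws.getD i "").toList.take j ≠ [] ∧ (ws.getD i "").toList.take j <+: v.toList)) := by
        intro h2
        have := hs.mp h2
        omega
      have hC : words.countP (fun v =>
          decide ((ws.getD i "").toList.take j ≠ [] ∧ (ws.getD i "").toList.take j <+: v.toList)) = 1 := by
        omega
      exact_mod_cast hC
  · omega
  · omega
  · omega

-- the two sums, index by index
theorem solution_eq (words : List String) :
    solution words = solution_alt words := by
  set ws := PySem.List.sorted words (fun w => w) false with hws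
  have hperm : ws.Perm words := PySem.List.sorted_perm words (fun w => w) false
  have map_getD : ∀ (l : List String) (f : String → Int),
      l.map f = (List.range l.length).map (fun i => f (l.getD i "")) := by
    intro l f
    apply List.ext_getElem
    · simp
    · intro i h1 h2
      simp only [List.getElem_map, List.getElem_range]
      rw [List.getD_eq_getElem l "" (by simpa using h1)]
  have hA : solution words = ((List.range ws.length).map (fun i => costA ws i)).sum := by
    rw [solution, PySem.List.foldl_add, ← hws]
    simp
  have hB : solution_alt words =
      ((List.range ws.length).map (fun i =>
        max (firstUniq (prefixCounts words) (ws.getD i "").toList (ws.getD i "").toList.length 1) 1)).sum := by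
    rw [solution_alt, PySem.List.foldl_add]
    have := map_getD ws (fun w => max (firstUniq (prefixCounts words) w.toList w.toList.length 1) 1)
    rw [← this, (hperm.map _).sum_eq]
    simp
  rw [hA, hB]
  apply congrArg
  apply List.map_congr_left
  intro i hmem
  rw [List.mem_range] at hmem
  rw [cB_eq words i hmem, ← hws, costA_eq ws i]
  have hle := nbr_le_len ws i
  split_ifs with h
  · have : nbr ws i = 0 := by omega
    rw [this, h]
    simp
  · omega

-- ===== VERDICT (by name: the statement is the Claim_ definition above) =====
theorem solution_spec : Claim_equal_solution := by
  intro words _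
  unfold Spec_solution
  exact solution_eq words
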